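-- pv_equiv track=rewrite | github.com/thilinicooray/DSA-Practice | AM13_binary_news_split.py | newspapers_split
-- ===== SOURCE A (Python) =====
-- from typing import List
--
-- def check_feasibility(papers, worker_count, max_time):
--     cur_workers = 1
--     req_time = max_time
--
--     for paper in papers:
--         if paper > max_time:
--             return False
--         else:
--             req_time = req_time - paper
--
--             if req_time < 0:
--                 cur_workers +=1
--                 req_time = max_time - paper
--
--     return cur_workers <= worker_count
--
-- def newspapers_split(newspapers: List[int], coworkers: int) -> int:
--     l = max(newspapers)
--     r = sum(newspapers)
--
--     min_time = -1
--
--     while l <= r: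
--         mid = (l+r) //2
--
--         is_feasible = check_feasibility(newspapers, coworkers, mid)
--
--         if is_feasible:
--             min_time = mid
--             r = mid -1
--         else:
--             l = mid +1
--
--     return min_time
-- ===== SOURCE B (Python) =====
-- def newspapers_split(newspapers, coworkers):
--     n = len(newspapers)
--     if coworkers < 1:
--         return -1
--     pre = [0]
--     for x in newspapers:
--         pre.append(pre[-1] + x)
--     k = min(coworkers, n)
--     dp = pre[:]
--     for _ in range(k - 1):
--         dp = [0] + [min(max(dp[j], pre[i] - pre[j]) for j in range(i)) for i in range(1, n + 1)]
--     return dp[n]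
-- ===== Notes on version B (the rewrite author's own statement) =====
-- stated objective: alternative
-- what changed: Replaces binary search on the answer with a greedy feasibility check by a bottom-up interval DP over prefix sums (dp[k][i] = best split of the first i papers into at most k groups), with no search and no feasibility predicate.
-- outside the precondition, e.g. on newspapers_split([], 1): A raises ValueError, B returns 0; on newspapers_split([2, 0, -2, 1, 2, 1], 2): A returns 3, B returns 2
import Mathlib
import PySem

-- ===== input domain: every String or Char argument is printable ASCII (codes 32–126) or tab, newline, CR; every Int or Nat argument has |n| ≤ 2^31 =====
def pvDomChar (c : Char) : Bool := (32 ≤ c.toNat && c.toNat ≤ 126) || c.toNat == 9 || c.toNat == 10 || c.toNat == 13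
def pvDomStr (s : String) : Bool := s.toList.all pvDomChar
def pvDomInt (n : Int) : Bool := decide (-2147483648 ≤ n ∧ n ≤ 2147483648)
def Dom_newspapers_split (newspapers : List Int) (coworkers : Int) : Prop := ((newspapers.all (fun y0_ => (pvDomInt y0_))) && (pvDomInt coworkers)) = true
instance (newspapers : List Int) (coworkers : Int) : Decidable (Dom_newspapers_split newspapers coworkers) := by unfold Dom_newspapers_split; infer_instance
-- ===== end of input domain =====

-- B replaces binary search on the answer by an interval DP over prefix sums; alternative algorithm, no speed claim.

-- ===== PORT A =====

-- the loop of check_feasibility, state = (cur_workers, req_time)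
def checkFeasLoop (workerCount maxTime : Int) : List Int → Int → Int → Bool
  | [], curWorkers, _ => decide (curWorkers ≤ workerCount)
  | paper :: rest, curWorkers, reqTime =>
    if paper > maxTime then false
    else
      if reqTime - paper < 0 then
        checkFeasLoop workerCount maxTime rest (curWorkers + 1) (maxTime - paper)
      else
        checkFeasLoop workerCount maxTime rest curWorkers (reqTime - paper)

def check_feasibility (papers : List Int) (workerCount maxTime : Int) : Bool :=
  checkFeasLoop workerCount maxTime papers 1 maxTime

-- the while-loop of newspapers_split, state = (l, r, min_time)
def bsLoop (papers : List Int) (coworkers : Int) (l r minTime : Int) : Int :=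
  if hlr : l ≤ r then
    let mid := PySem.Int.floordiv (l + r) 2
    if check_feasibility papers coworkers mid then
      bsLoop papers coworkers l (mid - 1) mid
    else
      bsLoop papers coworkers (mid + 1) r minTime
  else minTime
termination_by (r + 1 - l).toNat
decreasing_by
  all_goals
    have hb := PySem.Int.floordiv_two_mid_bounds hlr
    omega

def newspapers_split (newspapers : List Int) (coworkers : Int) : Int :=
  -- max(newspapers) raises ValueError on []; Pre_ excludes the empty list
  let l := (PySem.List.max? newspapers (fun y => y)).getD 0
  let r := newspapers.sum
  bsLoop newspapers coworkers l r (-1)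

-- ===== PORT B =====

-- pre.append(pre[-1] + x) loop; pre[-1] is PySem's pyGetD at -1 (pre is never empty)
def preStep (acc : List Int) (x : Int) : List Int :=
  acc ++ [PySem.List.pyGetD acc (-1) 0 + x]

-- min(max(dp[j], pre[i] - pre[j]) for j in range(i)); indices are in range, getD is exact there
def dpInner (dp pre : List Int) (i : Nat) : Int :=
  (PySem.List.min? ((List.range i).map (fun j => max (dp.getD j 0) (pre.getD i 0 - pre.getD j 0)))
      (fun y => y)).getD 0

-- one round of the dp update: dp = [0] + [ ... for i in range(1, n+1)]
def dpRound (pre : List Int) (n : Nat) (dp : List Int) : List Int :=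
  0 :: (List.range' 1 n).map (fun i => dpInner dp pre i)

def newspapers_split_alt (newspapers : List Int) (coworkers : Int) : Int :=
  let n := newspapers.length
  if coworkers < 1 then -1
  else
    let pre := newspapers.foldl preStep [0]
    let k := min coworkers (n : Int)
    let dp := pre
    let dp := (List.range (k - 1).toNat).foldl (fun d _ => dpRound pre n d) dp
    dp.getD n 0

-- ===== PRECONDITION & SPEC =====
-- Pre_ excludes the empty list (A raises ValueError) and, when coworkers ≥ 1, restricts to
-- the task's natural domain of nonnegative reading times: on lists with negative entries A's
-- greedy feasibility check is not monotone, so its binary-search result is a path-dependent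
-- artefact (with coworkers < 1 no split is ever feasible, so any nonempty list is admitted).
def Pre_newspapers_split (newspapers : List Int) (coworkers : Int) : Prop :=
  newspapers ≠ [] ∧ (coworkers < 1 ∨ ∀ x ∈ newspapers, 0 ≤ x)
instance (newspapers : List Int) (coworkers : Int) : Decidable (Pre_newspapers_split newspapers coworkers) := by
  unfold Pre_newspapers_split; infer_instance

def pvWitness_newspapers_split : List Int × Int := ([3, 1, 4, 1, 5], 2)

def Spec_newspapers_split (newspapers : List Int) (coworkers : Int) (out : Int) : Prop := out = newspapers_split_alt newspapers coworkers
instance (newspapers : List Int) (coworkers : Int) (out : Int) : Decidable (Spec_newspapers_split newspapers coworkers out) := by unfold Spec_newspapers_split; infer_instance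

-- ===== CLAIM (what is proved, stated in full; the proofs are below) =====
def Claim_equal_newspapers_split : Prop := ∀ (newspapers : List Int) (coworkers : Int), Dom_newspapers_split newspapers coworkers → Pre_newspapers_split newspapers coworkers → Spec_newspapers_split newspapers coworkers (newspapers_split newspapers coworkers)

-- ===== LEMMAS AND PROOFS =====

-- ---------- spec-level objects ----------

-- sum of the first i elements
def sumTake (xs : List Int) (i : Nat) : Int := (xs.take i).sum

-- min of a nonempty list (0 on []); equals Python's min()
def imin : List Int → Int
  | [] => 0
  | a :: l => l.foldl min a

-- the dp table as a function: dpS xs it i = value of dp[i] after it rounds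
def dpS (xs : List Int) : Nat → Nat → Int
  | 0, i => sumTake xs i
  | it+1, i =>
    if i = 0 then 0
    else imin ((List.range i).map (fun j => max (dpS xs it j) (sumTake xs i - sumTake xs j)))

-- "xs splits into at most m nonempty contiguous groups, each of sum ≤ t"
def CanSplit (m : Nat) (xs : List Int) (t : Int) : Prop :=
  ∃ gs : List (List Int), gs.flatten = xs ∧ gs.length ≤ m ∧ ∀ g ∈ gs, g ≠ [] ∧ g.sum ≤ t

-- greedy break count with remaining capacity rem
def parts (t : Int) : List Int → Int → Nat
  | [], _ => 0
  | p :: rest, rem =>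
    if rem - p < 0 then parts t rest (t - p) + 1 else parts t rest (rem - p)

-- ---------- imin ----------

theorem foldl_min_le_iff (t : Int) : ∀ (l : List Int) (a : Int),
    l.foldl min a ≤ t ↔ a ≤ t ∨ ∃ x ∈ l, x ≤ t := by
  intro l
  induction l with
  | nil => simp
  | cons b l ih =>
    intro a
    simp only [List.foldl_cons, ih, min_le_iff, List.mem_cons]
    constructor
    · rintro ((h | h) | ⟨x, hx, hxt⟩)
      · exact Or.inl h
      · exact Or.inr ⟨b, Or.inl rfl, h⟩
      · exact Or.inr ⟨x, Or.inr hx, hxt⟩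
    · rintro (h | ⟨x, (rfl | hx), hxt⟩)
      · exact Or.inl (Or.inl h)
      · exact Or.inl (Or.inr hxt)
      · exact Or.inr ⟨x, hx, hxt⟩

theorem imin_le_iff (l : List Int) (hl : l ≠ []) (t : Int) :
    imin l ≤ t ↔ ∃ x ∈ l, x ≤ t := by
  match l with
  | a :: l =>
    simp only [imin, foldl_min_le_iff, List.mem_cons]
    constructor
    · rintro (h | ⟨x, hx, hxt⟩)
      · exact ⟨a, Or.inl rfl, h⟩
      · exact ⟨x, Or.inr hx, hxt⟩
    · rintro ⟨x, (rfl | hx), hxt⟩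
      · exact Or.inl hxt
      · exact Or.inr ⟨x, hx, hxt⟩

theorem le_foldl_min (c : Int) : ∀ (l : List Int) (a : Int), c ≤ a → (∀ x ∈ l, c ≤ x) → c ≤ l.foldl min a := by
  intro l
  induction l with
  | nil => intro a ha _; simpa using ha
  | cons b l ih =>
    intro a ha h
    simp only [List.foldl_cons]
    exact ih (min a b) (le_min ha (h b (by simp))) (fun x hx => h x (by simp [hx]))

theorem le_imin (l : List Int) (hl : l ≠ []) (c : Int) (h : ∀ x ∈ l, c ≤ x) : c ≤ imin l := by
  match l with
  | a :: l =>
    exact le_foldl_min c l a (h a (by simp)) (fun x hx => h x (by simp [hx]))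

-- ---------- greedy loop ↔ parts ----------

theorem checkFeasLoop_iff (k t : Int) (xs : List Int) :
    ∀ cur req, checkFeasLoop k t xs cur req = true ↔
      (∀ x ∈ xs, x ≤ t) ∧ cur + (parts t xs req : Int) ≤ k := by
  induction xs with
  | nil => intro cur req; simp [checkFeasLoop, parts]
  | cons p rest ih =>
    intro cur req
    simp only [checkFeasLoop, parts]
    by_cases hp : p > t
    · simp only [if_pos hp]
      constructor
      · intro h; exact absurd h (by simp)
      · rintro ⟨h, -⟩; exact absurd (h p (by simp)) (by omega)
    · simp only [if_neg hp]
      by_cases hb : req - p < 0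
      · simp only [if_pos hb, ih]
        constructor
        · rintro ⟨h1, h2⟩
          exact ⟨by intro x hx; rcases List.mem_cons.1 hx with rfl | hx; omega; exact h1 x hx,
                 by push_cast at h2 ⊢; omega⟩
        · rintro ⟨h1, h2⟩
          exact ⟨fun x hx => h1 x (by simp [hx]), by push_cast at h2 ⊢; omega⟩
      · simp only [if_neg hb, ih]
        constructor
        · rintro ⟨h1, h2⟩
          exact ⟨by intro x hx; rcases List.mem_cons.1 hx with rfl | hx; omega; exact h1 x hx, h2⟩
        · rintro ⟨h1, h2⟩
          exact ⟨fun x hx => h1 x (by simp [hx]), h2⟩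

-- ---------- parts monotone in capacity (with a one-break slack) ----------

theorem parts_mono (t : Int) (xs : List Int) (h0 : ∀ x ∈ xs, 0 ≤ x) (hle : ∀ x ∈ xs, x ≤ t) :
    ∀ c c', 0 ≤ c → c ≤ c' → c' ≤ t →
      parts t xs c' ≤ parts t xs c ∧ parts t xs c ≤ parts t xs c' + 1 := by
  induction xs with
  | nil => intro c c' _ _ _; simp [parts]
  | cons p rest ih =>
    intro c c' hc hcc' hc't
    have hp0 : 0 ≤ p := h0 p (by simp)
    have hpt : p ≤ t := hle p (by simp)
    have h0' : ∀ x ∈ rest, 0 ≤ x := fun x hx => h0 x (by simp [hx])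
    have hle' : ∀ x ∈ rest, x ≤ t := fun x hx => hle x (by simp [hx])
    have ih' := ih h0' hle'
    simp only [parts]
    by_cases hb' : c' - p < 0
    · have hb : c - p < 0 := by omega
      simp only [if_pos hb', if_pos hb]
      have := ih' (t - p) (t - p) (by omega) (by omega) (by omega)
      omega
    · simp only [if_neg hb']
      by_cases hb : c - p < 0
      · simp only [if_pos hb]
        have h1 := (ih' (c' - p) (t - p) (by omega) (by omega) (by omega))
        omega
      · simp only [if_neg hb]
        exact ih' (c - p) (c' - p) (by omega) (by omega) (by omega)

-- ---------- CanSplit facts ----------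

theorem canSplit_mono_m {m m' : Nat} {xs : List Int} {t : Int} (h : m ≤ m')
    (hc : CanSplit m xs t) : CanSplit m' xs t := by
  obtain ⟨gs, h1, h2, h3⟩ := hc
  exact ⟨gs, h1, le_trans h2 h, h3⟩

theorem canSplit_mono_t {m : Nat} {xs : List Int} {t t' : Int} (h : t ≤ t')
    (hc : CanSplit m xs t) : CanSplit m xs t' := by
  obtain ⟨gs, h1, h2, h3⟩ := hc
  exact ⟨gs, h1, h2, fun g hg => ⟨(h3 g hg).1, le_trans (h3 g hg).2 h⟩⟩

theorem canSplit_len {m : Nat} {xs : List Int} {t : Int} (hc : CanSplit m xs t) :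
    CanSplit (min m xs.length) xs t := by
  obtain ⟨gs, h1, h2, h3⟩ := hc
  refine ⟨gs, h1, le_min h2 ?_, h3⟩
  subst h1
  calc gs.length = (gs.map (fun _ => 1)).sum := by simp
    _ ≤ (gs.map List.length).sum := by
        apply List.sum_le_sum
        intro g hg
        have hne := (h3 g hg).1
        have : 0 < g.length := List.length_pos_iff.mpr hne
        omega
    _ = gs.flatten.length := by rw [List.length_flatten]

theorem elem_le_of_canSplit {m : Nat} {xs : List Int} {t : Int} (h0 : ∀ x ∈ xs, 0 ≤ x)
    (hc : CanSplit m xs t) : ∀ x ∈ xs, x ≤ t := by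
  obtain ⟨gs, h1, h2, h3⟩ := hc
  intro x hx
  subst h1
  obtain ⟨g, hg, hxg⟩ := List.mem_flatten.1 hx
  have hsum := (h3 g hg).2
  have : x ≤ g.sum := by
    have : ∀ y ∈ g, 0 ≤ y := fun y hy => h0 y (List.mem_flatten.2 ⟨g, hg, hy⟩)
    exact List.single_le_sum this x hxg
  omega

theorem canSplit_whole (xs : List Int) (hne : xs ≠ []) (m : Nat) (hm : 1 ≤ m) :
    CanSplit m xs xs.sum := by
  exact ⟨[xs], by simp, by simpa using hm, by simp [hne]⟩

-- split off the last group
theorem canSplit_succ_iff (m : Nat) (ys : List Int) (t : Int) :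
    CanSplit (m+1) ys t ↔
      ys = [] ∨ ∃ j < ys.length, CanSplit m (ys.take j) t ∧ (ys.drop j).sum ≤ t := by
  constructor
  · rintro ⟨gs, h1, h2, h3⟩
    rcases eq_or_ne ys [] with rfl | hne
    · exact Or.inl rfl
    right
    have hgs : gs ≠ [] := by rintro rfl; simp at h1; exact hne h1
    obtain ⟨gs', g, rfl⟩ : ∃ gs' g, gs = gs' ++ [g] := by
      rcases List.eq_nil_or_concat gs with rfl | ⟨gs', g, h⟩
      · exact absurd rfl hgs
      · exact ⟨gs', g, by simpa [List.concat_eq_append] using h⟩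
    have hflat : gs'.flatten ++ g = ys := by simpa using h1
    have hg : g ≠ [] ∧ g.sum ≤ t := h3 g (by simp)
    refine ⟨gs'.flatten.length, ?_, ?_, ?_⟩
    · have hg0 : 0 < g.length := List.length_pos_iff.mpr hg.1
      rw [← hflat]
      simp [List.length_append]
      omega
    · refine ⟨gs', ?_, ?_, fun g' hg' => h3 g' (by simp [hg'])⟩
      · rw [← hflat, List.take_left]
      · have := h2; simp at this; omega
    · rw [← hflat, List.drop_left]
      exact hg.2
  · rintro (rfl | ⟨j, hj, ⟨gs, h1, h2, h3⟩, hsum⟩)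
    · exact ⟨[], by simp, by simp, by simp⟩
    refine ⟨gs ++ [ys.drop j], ?_, by simp; omega, ?_⟩
    · simp [h1]
    · intro g hg
      rcases List.mem_append.1 hg with hg | hg
      · exact h3 g hg
      · simp at hg
        subst hg
        refine ⟨?_, hsum⟩
        have : (ys.drop j).length = ys.length - j := by simp
        intro hnil
        rw [hnil] at this
        simp at this
        omega

-- ---------- greedy vs CanSplit ----------

-- peel the first group off a split of a nonempty list
theorem canSplit_peel {m : Nat} {ys : List Int} {t : Int} (hc : CanSplit m ys t) (hne : ys ≠ []) :
    ∃ (g b : List Int) (m' : Nat), m = m' + 1 ∧ ys = g ++ b ∧ g ≠ [] ∧ g.sum ≤ t ∧ CanSplit m' b t := by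
  obtain ⟨gs, h1, h2, h3⟩ := hc
  match gs, h1 with
  | [], h1 => exact absurd h1.symm hne
  | g :: gs', h1 =>
    have hm : 1 ≤ m := by have := h2; simp at this; omega
    refine ⟨g, gs'.flatten, m - 1, by omega, by simp [← h1], (h3 g (by simp)).1,
      (h3 g (by simp)).2, gs', rfl, ?_, fun g' hg' => h3 g' (by simp [hg'])⟩
    have := h2; simp at this; omega

theorem parts_le_of_split (t : Int) (xs : List Int) (h0 : ∀ x ∈ xs, 0 ≤ x) (hle : ∀ x ∈ xs, x ≤ t) :
    ∀ (rem : Int) (m : Nat) (a b : List Int), 0 ≤ rem → rem ≤ t →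
      xs = a ++ b → a.sum ≤ rem → CanSplit m b t → parts t xs rem ≤ m := by
  induction xs with
  | nil => intro rem m a b _ _ _ _ _; simp [parts]
  | cons p rest ih =>
    intro rem m a b hrem0 hremt hsplit hsum hcs
    have hp0 : 0 ≤ p := h0 p (by simp)
    have hpt : p ≤ t := hle p (by simp)
    have h0' : ∀ x ∈ rest, 0 ≤ x := fun x hx => h0 x (by simp [hx])
    have hle' : ∀ x ∈ rest, x ≤ t := fun x hx => hle x (by simp [hx])
    match a, hsplit with
    | q :: a₂, hsplit =>
      obtain ⟨rfl, hrest⟩ : q = p ∧ rest = a₂ ++ b := by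
        have := hsplit
        simp only [List.cons_append, List.cons.injEq] at this
        exact ⟨this.1.symm, this.2⟩
      have ha₂0 : 0 ≤ a₂.sum := by
        apply List.sum_nonneg
        intro x hx
        exact h0' x (by simp [hrest, hx])
      have hsum2 : q + a₂.sum ≤ rem := by simpa using hsum
      have hnb : ¬ (rem - q < 0) := by omega
      simp only [parts, if_neg hnb]
      exact ih h0' hle' (rem - q) m a₂ b (by omega) (by omega) hrest (by omega) hcs
    | [], hsplit =>
      have hb : b = p :: rest := by simpa using hsplit.symm
      subst hb
      obtain ⟨g, b', m'', hm, hgb, hgne, hgsum, hcs'⟩ := canSplit_peel hcs (by simp)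
      match g, hgne, hgb with
      | q :: g₂, _, hgb =>
        obtain ⟨rfl, hrest⟩ : q = p ∧ rest = g₂ ++ b' := by
          have := hgb
          simp only [List.cons_append, List.cons.injEq] at this
          exact ⟨this.1.symm, this.2⟩
        have hg₂ : g₂.sum ≤ t - q := by simp at hgsum; omega
        have hrec : parts t rest (t - q) ≤ m'' :=
          ih h0' hle' (t - q) m'' g₂ b' (by omega) (by omega) hrest hg₂ hcs'
        by_cases hbr : rem - q < 0
        · simp only [parts, if_pos hbr]
          omega
        · simp only [parts, if_neg hbr]
          have hslack := (parts_mono t rest h0' hle' (rem - q) (t - q) (by omega) (by omega) (by omega)).2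
          omega

theorem split_of_parts (t : Int) (xs : List Int) (h0 : ∀ x ∈ xs, 0 ≤ x) (hle : ∀ x ∈ xs, x ≤ t) :
    ∀ c : Int, 0 ≤ c → c ≤ t →
      ∃ a b, xs = a ++ b ∧ a.sum ≤ c ∧ CanSplit (parts t xs c) b t := by
  induction xs with
  | nil => intro c hc _; exact ⟨[], [], by simp, by simpa using hc, [], by simp, by simp, by simp⟩
  | cons p rest ih =>
    intro c hc hct
    have hp0 : 0 ≤ p := h0 p (by simp)
    have hpt : p ≤ t := hle p (by simp)
    have h0' : ∀ x ∈ rest, 0 ≤ x := fun x hx => h0 x (by simp [hx])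
    have hle' : ∀ x ∈ rest, x ≤ t := fun x hx => hle x (by simp [hx])
    by_cases hb : c - p < 0
    · simp only [parts, if_pos hb]
      obtain ⟨a, b, hab, hasum, hcs⟩ := ih h0' hle' (t - p) (by omega) (by omega)
      refine ⟨[], p :: rest, by simp, by simpa using hc, ?_⟩
      obtain ⟨gs, h1, h2, h3⟩ := hcs
      refine ⟨(p :: a) :: gs, by simp [h1, hab], by simp; omega, ?_⟩
      intro g hg
      rcases List.mem_cons.1 hg with rfl | hg
      · exact ⟨by simp, by simp; omega⟩
      · exact h3 g hg
    · simp only [parts, if_neg hb]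
      obtain ⟨a, b, hab, hasum, hcs⟩ := ih h0' hle' (c - p) (by omega) (by omega)
      exact ⟨p :: a, b, by simp [hab], by simp; omega, hcs⟩

-- wrappers
theorem canSplit_greedy (t : Int) (xs : List Int) (h0 : ∀ x ∈ xs, 0 ≤ x) (hle : ∀ x ∈ xs, x ≤ t)
    (ht : 0 ≤ t) : CanSplit (parts t xs t + 1) xs t := by
  obtain ⟨a, b, hab, hasum, hcs⟩ := split_of_parts t xs h0 hle t ht le_rfl
  subst hab
  rcases eq_or_ne a [] with rfl | hane
  · simpa using canSplit_mono_m (Nat.le_succ _) hcs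
  · obtain ⟨gs, h1, h2, h3⟩ := hcs
    refine ⟨a :: gs, by simp [h1], by simp; omega, ?_⟩
    intro g hg
    rcases List.mem_cons.1 hg with rfl | hg
    · exact ⟨hane, hasum⟩
    · exact h3 g hg

theorem greedy_le_split (t : Int) (xs : List Int) (h0 : ∀ x ∈ xs, 0 ≤ x) (hle : ∀ x ∈ xs, x ≤ t)
    (hne : xs ≠ []) (m : Nat) (h : CanSplit m xs t) : parts t xs t + 1 ≤ m := by
  obtain ⟨g, b, m', hm, hgb, hgne, hgsum, hcs⟩ := canSplit_peel h hne
  match xs, hne, g, hgne, hgb with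
  | p :: rest, _, q :: g₂, _, hgb =>
    obtain ⟨rfl, hrest⟩ : q = p ∧ rest = g₂ ++ b := by
      have := hgb
      simp only [List.cons_append, List.cons.injEq] at this
      exact ⟨this.1.symm, this.2⟩
    have hp0 : 0 ≤ q := h0 q (by simp)
    have hpt : q ≤ t := hle q (by simp)
    have h0' : ∀ x ∈ rest, 0 ≤ x := fun x hx => h0 x (by simp [hx])
    have hle' : ∀ x ∈ rest, x ≤ t := fun x hx => hle x (by simp [hx])
    have hnb : ¬ (t - q < 0) := by omega
    simp only [parts, if_neg hnb]
    have hg₂ : g₂.sum ≤ t - q := by simp at hgsum; omega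
    have := parts_le_of_split t rest h0' hle' (t - q) m' g₂ b (by omega) (by omega) hrest hg₂ hcs
    omega

-- ---------- dpS ↔ CanSplit ----------

theorem dpS_nonneg (xs : List Int) (h0 : ∀ x ∈ xs, 0 ≤ x) :
    ∀ it i, 0 ≤ dpS xs it i := by
  intro it
  induction it with
  | zero =>
    intro i
    exact List.sum_nonneg (fun x hx => h0 x (List.mem_of_mem_take hx))
  | succ it ih =>
    intro i
    rcases eq_or_ne i 0 with rfl | hi
    · simp [dpS]
    · simp only [dpS, if_neg hi]
      apply le_imin
      · simp [hi]
      · intro x hx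
        simp only [List.mem_map, List.mem_range] at hx
        obtain ⟨j, hj, rfl⟩ := hx
        exact le_trans (ih j) (le_max_left _ _)

theorem dpS_le_iff (xs : List Int) (h0 : ∀ x ∈ xs, 0 ≤ x) :
    ∀ (it : Nat) (i : Nat) (t : Int), i ≤ xs.length → 0 ≤ t →
      (dpS xs it i ≤ t ↔ CanSplit (it+1) (xs.take i) t) := by
  intro it
  induction it with
  | zero =>
    intro i t hi ht
    simp only [dpS, sumTake]
    constructor
    · intro h
      rcases eq_or_ne (xs.take i) [] with he | he
      · exact ⟨[], by simp [he], by simp, by simp⟩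
      · exact ⟨[xs.take i], by simp, by simp, by simp [he, h]⟩
    · rintro ⟨gs, h1, h2, h3⟩
      match gs, h1, h2 with
      | [], h1, _ => simp [← h1]; omega
      | [g], h1, _ =>
        have : (xs.take i).sum = g.sum := by rw [← h1]; simp
        rw [this]
        exact (h3 g (by simp)).2
  | succ it ih =>
    intro i t hi ht
    rcases eq_or_ne i 0 with rfl | hi0
    · simp only [dpS]
      constructor
      · intro _; exact ⟨[], by simp, by simp, by simp⟩
      · intro _; exact ht
    · simp only [dpS, if_neg hi0]
      have hlen : (xs.take i).length = i := by simp; omega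
      have hne : xs.take i ≠ [] := by
        intro h
        rw [h] at hlen
        simp at hlen
        omega
      rw [imin_le_iff _ (by simp [hi0]), canSplit_succ_iff]
      simp only [List.mem_map, List.mem_range]
      constructor
      · rintro ⟨x, ⟨j, hj, rfl⟩, hxt⟩
        right
        refine ⟨j, by omega, ?_, ?_⟩
        · rw [List.take_take, min_eq_left (by omega)]
          exact (ih j t (by omega) ht).1 (le_trans (le_max_left _ _) hxt)
        · have hsplit := List.sum_take_add_sum_drop (xs.take i) j
          rw [List.take_take, min_eq_left (by omega)] at hsplit
          have : sumTake xs i - sumTake xs j ≤ t := le_trans (le_max_right _ _) hxt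
          simp only [sumTake] at this ⊢
          omega
      · rintro (h | ⟨j, hj, hcs, hsum⟩)
        · exact absurd h hne
        · rw [hlen] at hj
          rw [List.take_take, min_eq_left (by omega)] at hcs
          refine ⟨_, ⟨j, hj, rfl⟩, ?_⟩
          have h1 : dpS xs it j ≤ t := (ih j t (by omega) ht).2 hcs
          have hsplit := List.sum_take_add_sum_drop (xs.take i) j
          rw [List.take_take, min_eq_left (by omega)] at hsplit
          simp only [sumTake] at hsplit ⊢
          have h2 : (xs.take i).sum - (xs.take j).sum ≤ t := by omega
          exact max_le h1 (by omega)

-- ---------- port B computes dpS ----------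

-- running prefix sums starting from c
def psAux (c : Int) : List Int → List Int
  | [] => []
  | x :: xs => (c + x) :: psAux (c + x) xs

theorem foldl_preStep (xs : List Int) : ∀ (acc : List Int) (c : Int), acc.getLast? = some c →
    xs.foldl preStep acc = acc ++ psAux c xs := by
  induction xs with
  | nil => intro acc c _; simp [psAux]
  | cons x xs ih =>
    intro acc c hc
    have hne : acc ≠ [] := by rintro rfl; simp at hc
    have hstep : preStep acc x = acc ++ [c + x] := by
      unfold preStep
      rw [PySem.List.pyGetD_neg_one acc 0 hne]
      have := List.getLast?_eq_some_getLast hne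
      rw [this] at hc
      simp only [Option.some.injEq] at hc
      rw [hc]
    simp only [List.foldl_cons, hstep]
    rw [ih (acc ++ [c + x]) (c + x) (by simp)]
    simp [psAux]

theorem psAux_eq (xs : List Int) : ∀ c : Int,
    psAux c xs = (List.range xs.length).map (fun i => c + sumTake xs (i+1)) := by
  induction xs with
  | nil => intro c; simp [psAux]
  | cons x xs ih =>
    intro c
    simp only [psAux, List.length_cons, List.range_succ_eq_map, List.map_cons, List.map_map]
    refine List.cons_eq_cons.mpr ⟨by simp [sumTake], ?_⟩
    rw [ih (c + x)]
    apply List.map_congr_left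
    intro i _
    simp [sumTake, Function.comp]
    ring

theorem pre_eq (xs : List Int) :
    xs.foldl preStep [0] = (List.range (xs.length + 1)).map (fun i => sumTake xs i) := by
  rw [foldl_preStep xs [0] 0 (by simp), psAux_eq]
  simp only [List.range_succ_eq_map, List.map_cons, List.map_map, List.singleton_append]
  refine List.cons_eq_cons.mpr ⟨by simp [sumTake], ?_⟩
  apply List.map_congr_left
  intro i _
  simp [Function.comp]

theorem getD_map_range_lt (f : Nat → Int) (m i : Nat) (h : i < m) :
    ((List.range m).map f).getD i 0 = f i := by
  rw [List.getD_eq_getElem?_getD, List.getElem?_map, List.getElem?_range h]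
  rfl

theorem dp_fold_eq (xs : List Int) (it : Nat) :
    (List.range it).foldl (fun d _ => dpRound (xs.foldl preStep [0]) xs.length d)
        (xs.foldl preStep [0])
      = (List.range (xs.length + 1)).map (fun i => dpS xs it i) := by
  induction it with
  | zero =>
    rw [pre_eq]
    rfl
  | succ it ih =>
    rw [List.range_succ, List.foldl_append, ih]
    simp only [List.foldl_cons, List.foldl_nil]
    unfold dpRound
    have hr : List.range (xs.length + 1) = 0 :: List.range' 1 xs.length := by
      rw [List.range_eq_range', List.range'_succ]
    conv_rhs => rw [hr]
    simp only [List.map_cons]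
    refine List.cons_eq_cons.mpr ⟨by simp [dpS], ?_⟩
    apply List.map_congr_left
    intro i hi
    have hi' : 1 ≤ i ∧ i ≤ xs.length := by
      have := List.mem_range'_1.1 hi
      omega
    unfold dpInner
    have hmap : (List.range i).map
        (fun j => max ((((List.range (xs.length + 1)).map (fun i => dpS xs it i))).getD j 0)
          (((xs.foldl preStep [0]).getD i 0) - ((xs.foldl preStep [0]).getD j 0)))
        = (List.range i).map (fun j => max (dpS xs it j) (sumTake xs i - sumTake xs j)) := by
      apply List.map_congr_left
      intro j hj
      have hj' : j < i := List.mem_range.1 hj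
      rw [pre_eq, getD_map_range_lt _ _ _ (by omega), getD_map_range_lt _ _ _ (by omega),
        getD_map_range_lt _ _ _ (by omega)]
    rw [hmap]
    have hne : ∃ y l, (List.range i).map (fun j => max (dpS xs it j) (sumTake xs i - sumTake xs j)) = y :: l := by
      match h : (List.range i).map (fun j => max (dpS xs it j) (sumTake xs i - sumTake xs j)) with
      | [] =>
        exfalso
        have := congrArg List.length h
        simp at this
        omega
      | y :: l => exact ⟨y, l, rfl⟩
    obtain ⟨y, l, hyl⟩ := hne
    rw [hyl, PySem.List.min?_id_cons]
    simp only [dpS, if_neg (by omega : ¬ i = 0)]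
    rw [hyl]
    rfl

theorem alt_eq_dpS (xs : List Int) (coworkers : Int) (hk : 1 ≤ coworkers) :
    newspapers_split_alt xs coworkers = dpS xs (min coworkers (xs.length : Int) - 1).toNat xs.length := by
  unfold newspapers_split_alt
  rw [if_neg (by omega)]
  show (List.foldl (fun d _ => dpRound (List.foldl preStep [0] xs) xs.length d)
      (List.foldl preStep [0] xs)
      (List.range (min coworkers (xs.length : Int) - 1).toNat)).getD xs.length 0 = _
  rw [dp_fold_eq xs (min coworkers (xs.length : Int) - 1).toNat]
  exact getD_map_range_lt _ _ _ (by omega)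

-- ---------- binary search ----------

theorem bsLoop_none (papers : List Int) (k : Int)
    (hF : ∀ t, check_feasibility papers k t = false) :
    ∀ l r best, bsLoop papers k l r best = best := by
  intro l r best
  fun_induction bsLoop papers k l r best with
  | case1 l r best hlr mid hfeas ih => rw [hF] at hfeas; exact absurd hfeas (by simp)
  | case2 l r best hlr mid hfeas ih => exact ih
  | case3 l r best hlr => rfl

theorem bsLoop_exact (papers : List Int) (k x₀ : Int)
    (hx : check_feasibility papers k x₀ = true)
    (hmin : ∀ t, check_feasibility papers k t = true → x₀ ≤ t)
    (hmono : ∀ t t', t ≤ t' → check_feasibility papers k t = true → check_feasibility papers k t' = true) :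
    ∀ l r best, l ≤ x₀ → (x₀ ≤ r ∨ best = x₀) → bsLoop papers k l r best = x₀ := by
  intro l r best
  fun_induction bsLoop papers k l r best with
  | case1 l r best hlr mid hfeas ih =>
    intro hl hr
    have hmid : l ≤ mid ∧ mid ≤ r := PySem.Int.floordiv_two_mid_bounds hlr
    have hx₀mid : x₀ ≤ mid := hmin mid hfeas
    exact ih hl (by omega)
  | case2 l r best hlr mid hfeas ih =>
    intro hl hr
    have hmid : l ≤ mid ∧ mid ≤ r := PySem.Int.floordiv_two_mid_bounds hlr
    have hmidx : mid < x₀ := by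
      by_contra hcon
      exact absurd (hmono x₀ mid (by omega) hx) (by simp [hfeas])
    exact ih (by omega) hr
  | case3 l r best hlr =>
    intro hl hr
    omega

-- ===== VERDICT (by name: the statement is the Claim_ definition above) =====
-- characterization of the feasibility check on the admitted domain
theorem check_iff (xs : List Int) (k t : Int) :
    check_feasibility xs k t = true ↔ (∀ x ∈ xs, x ≤ t) ∧ 1 + (parts t xs t : Int) ≤ k := by
  unfold check_feasibility
  rw [checkFeasLoop_iff]

theorem newspapers_split_spec : Claim_equal_newspapers_split := by
  intro xs k _ hpre
  obtain ⟨hne, hd⟩ := hpre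
  unfold Spec_newspapers_split
  by_cases hk : k < 1
  · -- coworkers < 1: never feasible, both return -1
    have hF : ∀ t, check_feasibility xs k t = false := by
      intro t
      by_contra hcon
      have := (check_iff xs k t).1 (by revert hcon; cases check_feasibility xs k t <;> simp)
      have hp := this.2
      have : (0:Int) ≤ (parts t xs t : Int) := by positivity
      omega
    unfold newspapers_split newspapers_split_alt
    rw [if_pos hk, bsLoop_none xs k hF]
  · -- coworkers ≥ 1
    rw [not_lt] at hk
    have h0 : ∀ x ∈ xs, 0 ≤ x := hd.resolve_left (by omega)
    have hn1 : 1 ≤ xs.length := List.length_pos_iff.mpr hne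
    set n := xs.length with hn
    set it := (min k (n : Int) - 1).toNat with hit
    have hmB : (it : Int) + 1 = min k (n : Int) := by
      have h1 : (1:Int) ≤ min k (n : Int) := le_min hk (by exact_mod_cast hn1)
      omega
    set x₀ := dpS xs it n with hx₀
    have hx0nn : 0 ≤ x₀ := dpS_nonneg xs h0 it n
    have hsplit : CanSplit (it+1) xs x₀ := by
      have := (dpS_le_iff xs h0 it n x₀ le_rfl hx0nn).1 le_rfl
      rwa [List.take_length] at this
    have hallle : ∀ x ∈ xs, x ≤ x₀ := elem_le_of_canSplit h0 hsplit
    have ht0 : ∀ t : Int, (∀ x ∈ xs, x ≤ t) → 0 ≤ t := by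
      intro t hal
      match xs, hne with
      | x :: _, _ => exact le_trans (h0 x (by simp)) (hal x (by simp))
    have hmBk : ((it : Int) + 1) ≤ k := by rw [hmB]; exact min_le_left _ _
    have hmBn : ((it : Int) + 1) ≤ (n : Int) := by rw [hmB]; exact min_le_right _ _
    have hFx : check_feasibility xs k x₀ = true := by
      rw [check_iff]
      refine ⟨hallle, ?_⟩
      have := greedy_le_split x₀ xs h0 hallle hne (it+1) hsplit
      push_cast at this hmBk ⊢
      omega
    have hmin : ∀ t, check_feasibility xs k t = true → x₀ ≤ t := by
      intro t hft
      obtain ⟨hal, hpk⟩ := (check_iff xs k t).1 hft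
      have ht : 0 ≤ t := ht0 t hal
      have hcs := canSplit_greedy t xs h0 hal ht
      have hcs2 := canSplit_len hcs
      have hle : min (parts t xs t + 1) xs.length ≤ it + 1 := by
        have : (parts t xs t : Int) + 1 ≤ k := by omega
        have h2 := hmB
        push_cast at h2
        omega
      have hcs3 := canSplit_mono_m hle hcs2
      have := (dpS_le_iff xs h0 it n t le_rfl ht).2 (by rwa [List.take_length])
      exact this
    have hmono : ∀ t t', t ≤ t' → check_feasibility xs k t = true →
        check_feasibility xs k t' = true := by
      intro t t' htt hft
      obtain ⟨hal, hpk⟩ := (check_iff xs k t).1 hft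
      have ht : 0 ≤ t := ht0 t hal
      have hal' : ∀ x ∈ xs, x ≤ t' := fun x hx => le_trans (hal x hx) htt
      rw [check_iff]
      refine ⟨hal', ?_⟩
      have hcs : CanSplit (parts t xs t + 1) xs t' :=
        canSplit_mono_t htt (canSplit_greedy t xs h0 hal ht)
      have := greedy_le_split t' xs h0 hal' hne _ hcs
      push_cast at this ⊢
      omega
    -- the bounds of the search interval
    obtain ⟨mx, hmx⟩ : ∃ mx, PySem.List.max? xs (fun y => y) = some mx := by
      cases hmm : PySem.List.max? xs (fun y => y) with
      | none => exact absurd ((PySem.List.max?_eq_none_iff xs (fun y => y)).1 hmm) hne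
      | some m => exact ⟨m, rfl⟩
    have hmxmem : mx ∈ xs := PySem.List.max?_mem hmx
    have hlx : mx ≤ x₀ := hallle mx hmxmem
    have hsum0 : 0 ≤ xs.sum := List.sum_nonneg h0
    have hxr : x₀ ≤ xs.sum := by
      have hw := canSplit_whole xs hne (it+1) (by omega)
      have := (dpS_le_iff xs h0 it n xs.sum le_rfl hsum0).2 (by rwa [List.take_length])
      exact this
    have hA : newspapers_split xs k = x₀ := by
      unfold newspapers_split
      rw [hmx]
      exact bsLoop_exact xs k x₀ hFx hmin hmono mx xs.sum (-1) hlx (Or.inl hxr)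
    have hB : newspapers_split_alt xs k = x₀ := alt_eq_dpS xs k hk
    rw [hA, hB]
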